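-- pv_equiv track=rewrite | github.com/JordanMLewis/intro-to-python-cis210 | Project3/alphacode.py | alphapinEncode
-- ===== SOURCE A (Python) =====
-- def alphapinEncode(pin):
--     '''
--     (int) ---> str
--
--     This function, alphapinEncode, is used to automate the process of converting a password, pin number, or SSN
--     to and easy to remember string consisting of consonants+vowel pairs. alphapinEncode will have one parameter,
--     pin, of type integer, and will return alphaPin (the encoded pin), in the form of a string.
--
--     Ex:
--     >>>alphapinEncode(4327)
--     'lohi'
--
--     >>>alphapinEncode(1298)
--     'dizo'
--
--     >>>alphapinEncode(3463470)
--     'bomejusa'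
--
--     '''
--     alphaPin = ''
--     vowels = "aeiou"
--     consonants = "bcdfghjklmnpqrstvwyz"
--     while pin > 0:
--         lastDigits = pin % 100 #Seperate last two digits
--         alphaPin = vowels[(lastDigits % 5)] + alphaPin #get the 1st digit and convert
--         alphaPin = consonants[(lastDigits // 5)] + alphaPin #get the 2nd digit and convert
--         pin = pin // 100 #divide the number to get new digits
--     return alphaPin
-- ===== SOURCE B (Python) =====
-- def alphapinEncode(pin):
--     '''Recursive most-significant-first encoding: encode(pin) = encode(pin // 100) + pair(pin % 100).'''
--     vowels = "aeiou"
--     consonants = "bcdfghjklmnpqrstvwyz"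
--     if pin <= 0:
--         return ''
--     d = pin % 100
--     return alphapinEncode(pin // 100) + consonants[d // 5] + vowels[d % 5]
-- ===== Notes on version B (the rewrite author's own statement) =====
-- stated objective: alternative
-- what changed: Replaces A's while-loop that prepends each consonant-vowel pair to an accumulator string with a recursion on the remaining higher digits that builds the string most-significant-first by appending the pair for the last two digits after the recursive call.
import Mathlib
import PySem

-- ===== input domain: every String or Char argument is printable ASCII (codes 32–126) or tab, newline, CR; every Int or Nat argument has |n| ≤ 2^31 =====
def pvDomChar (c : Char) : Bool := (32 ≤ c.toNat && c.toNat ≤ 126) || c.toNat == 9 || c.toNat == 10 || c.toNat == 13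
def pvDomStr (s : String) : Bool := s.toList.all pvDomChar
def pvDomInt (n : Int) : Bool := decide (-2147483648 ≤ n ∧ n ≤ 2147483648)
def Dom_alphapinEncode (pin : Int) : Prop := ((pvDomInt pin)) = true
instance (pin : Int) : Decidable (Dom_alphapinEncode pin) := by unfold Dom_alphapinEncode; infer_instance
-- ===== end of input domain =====

-- B replaces A's prepend-to-accumulator while-loop by a most-significant-first recursion
-- encode(pin) = encode(pin // 100) + pair(pin % 100); same strings, different decomposition.

-- ===== PORT A =====
-- Strings are ported on the List Char side (PySem convention); the indices vowels[d%5]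
-- and consonants[d//5] are always in range in Python (0 ≤ d%100 < 100), so pyGetD is exact.
def pvVowels : List Char := "aeiou".toList
def pvConsonants : List Char := "bcdfghjklmnpqrstvwyz".toList

-- the while-loop of A, with alphaPin as the accumulator (prepending each pair)
def alphapinLoopA (pin : Int) (acc : List Char) : List Char :=
  if _h : pin > 0 then
    let lastDigits := PySem.Int.mod pin 100
    let acc1 := PySem.List.pyGetD pvVowels (PySem.Int.mod lastDigits 5) 'a' :: acc
    let acc2 := PySem.List.pyGetD pvConsonants (PySem.Int.floordiv lastDigits 5) 'b' :: acc1
    alphapinLoopA (PySem.Int.floordiv pin 100) acc2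
  else acc
termination_by pin.toNat
decreasing_by
  have h2 : PySem.Int.floordiv pin 100 = pin / 100 :=
    PySem.Int.floordiv_eq_ediv_of_pos (by omega)
  rw [h2]; omega

def alphapinEncode (pin : Int) : String := String.ofList (alphapinLoopA pin [])

-- ===== PORT B =====
def alphapinAltGo (pin : Int) : List Char :=
  if pin ≤ 0 then []
  else
    let d := PySem.Int.mod pin 100
    alphapinAltGo (PySem.Int.floordiv pin 100) ++
      [PySem.List.pyGetD pvConsonants (PySem.Int.floordiv d 5) 'b',
       PySem.List.pyGetD pvVowels (PySem.Int.mod d 5) 'a']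
termination_by pin.toNat
decreasing_by
  have h2 : PySem.Int.floordiv pin 100 = pin / 100 :=
    PySem.Int.floordiv_eq_ediv_of_pos (by omega)
  rw [h2]; omega

def alphapinEncode_alt (pin : Int) : String := String.ofList (alphapinAltGo pin)

-- ===== PRECONDITION & SPEC =====
def Spec_alphapinEncode (pin : Int) (out : String) : Prop := out = alphapinEncode_alt pin
instance (pin : Int) (out : String) : Decidable (Spec_alphapinEncode pin out) := by unfold Spec_alphapinEncode; infer_instance

-- ===== CLAIM (what is proved, stated in full; the proofs are below) =====
def Claim_equal_alphapinEncode : Prop := ∀ (pin : Int), Dom_alphapinEncode pin → Spec_alphapinEncode pin (alphapinEncode pin)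

-- ===== LEMMAS AND PROOFS =====
-- A's accumulating loop equals B's recursion followed by the pending accumulator.
theorem alphapinLoopA_eq_altGo_append (pin : Int) (acc : List Char) :
    alphapinLoopA pin acc = alphapinAltGo pin ++ acc := by
  induction pin, acc using alphapinLoopA.induct with
  | case1 pin acc h lastDigits acc1 acc2 ih =>
    rw [alphapinLoopA, dif_pos h, ih]
    conv_rhs => rw [alphapinAltGo, if_neg (by omega : ¬ pin ≤ 0)]
    simp [acc2, acc1, lastDigits]
  | case2 pin acc h =>
    rw [alphapinLoopA, dif_neg h, alphapinAltGo, if_pos (by omega : pin ≤ 0)]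
    simp

-- ===== VERDICT (by name: the statement is the Claim_ definition above) =====
theorem alphapinEncode_spec : Claim_equal_alphapinEncode := by
  intro pin _
  unfold Spec_alphapinEncode alphapinEncode alphapinEncode_alt
  rw [alphapinLoopA_eq_altGo_append, List.append_nil]
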